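-- pv_equiv track=rewrite | github.com/sswez02/InForm | src/answerer.py | simplify_text_for_beginner
-- ===== SOURCE A (Python) =====
-- def simplify_text_for_beginner(text: str) -> str:
--     # Beginner version: remove jargon, shorten sentences
--     replacements = {
--         "hypertrophy": "muscle growth",
--         "placebo-controlled": "compared to a non-active group",
--         "resistance-trained individuals": "people who already lift weights",
--         "untrained participants": "beginners",
--         "significant increases": "noticeable improvements",
--         "strength performance": "strength",
--     }
--     for k, v in replacements.items():
--         text = text.replace(k, v)
--     return text
-- ===== SOURCE B (Python) =====
-- import re
--
-- def simplify_text_for_beginner(text: str) -> str: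
--     # Beginner version: remove jargon, shorten sentences.
--     # One compiled alternation regex -> a single left-to-right pass over the
--     # text; each matched jargon phrase is looked up once in the dict.  (The
--     # keys are prefix-free, so first-alternative matching is unambiguous.)
--     replacements = {
--         "hypertrophy": "muscle growth",
--         "placebo-controlled": "compared to a non-active group",
--         "resistance-trained individuals": "people who already lift weights",
--         "untrained participants": "beginners",
--         "significant increases": "noticeable improvements",
--         "strength performance": "strength",
--     }
--     pattern = re.compile("|".join(re.escape(k) for k in replacements))
--     return pattern.sub(lambda m: replacements[m.group(0)], text)
-- ===== Notes on version B (the rewrite author's own statement) =====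
-- stated objective: alternative
-- what changed: Replaces the six sequential full-string replace passes by one compiled alternation regex applied in a single left-to-right pass, each matched jargon phrase looked up once in the dict.
import Mathlib
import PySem

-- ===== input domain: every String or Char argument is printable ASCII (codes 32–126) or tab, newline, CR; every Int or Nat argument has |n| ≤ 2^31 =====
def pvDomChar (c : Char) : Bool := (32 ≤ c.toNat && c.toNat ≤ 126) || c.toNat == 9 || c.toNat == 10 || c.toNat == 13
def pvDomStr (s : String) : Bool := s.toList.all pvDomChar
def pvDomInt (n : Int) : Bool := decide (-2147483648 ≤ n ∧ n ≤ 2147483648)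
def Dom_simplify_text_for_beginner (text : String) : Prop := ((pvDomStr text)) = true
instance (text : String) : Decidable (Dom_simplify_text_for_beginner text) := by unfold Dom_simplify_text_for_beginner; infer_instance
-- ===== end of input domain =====

-- B replaces A's six sequential full-string replace passes by a single left-to-right
-- pass (one compiled alternation regex in Python); Pre_ excludes texts where two jargon
-- phrases overlap, on which the resolution order is anybody's choice (see Pre_ below).


-- ===== PORT A =====
-- literal transliteration of A: a dict literal, then `for k, v in replacements.items(): text = text.replace(k, v)`
def simplify_text_for_beginner (text : String) : String :=
  let replacements : PySem.Dict String String := PySem.Dict.mk [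
    ("hypertrophy", "muscle growth"),
    ("placebo-controlled", "compared to a non-active group"),
    ("resistance-trained individuals", "people who already lift weights"),
    ("untrained participants", "beginners"),
    ("significant increases", "noticeable improvements"),
    ("strength performance", "strength")]
  replacements.items.foldl (fun t kv => PySem.Str.replace t kv.1 kv.2) text

-- ===== PORT B =====
-- B compiles one alternation regex of the (escaped, literal) keys and calls re.sub once.
-- Exact model of that call: a single left-to-right scan; at each position the first
-- alternative (dict order) that matches is replaced by its dict value, else one char
-- is copied.  Fuel = remaining length (each step consumes at least one character).
def pvTable : List (List Char × List Char) := [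
  ("hypertrophy".toList, "muscle growth".toList),
  ("placebo-controlled".toList, "compared to a non-active group".toList),
  ("resistance-trained individuals".toList, "people who already lift weights".toList),
  ("untrained participants".toList, "beginners".toList),
  ("significant increases".toList, "noticeable improvements".toList),
  ("strength performance".toList, "strength".toList)]

def pvSub : Nat → List Char → List Char
  | 0, l => l
  | _ + 1, [] => []
  | f + 1, c :: t =>
    match pvTable.find? (fun kv => kv.1.isPrefixOf (c :: t)) with
    | some kv => kv.2 ++ pvSub f (List.drop (kv.1.length - 1) t)
    | none => c :: pvSub f t

def simplify_text_for_beginner_alt (text : String) : String :=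
  String.ofList (pvSub text.toList.length text.toList)

-- ===== PRECONDITION & SPEC =====
-- Pre_ excludes texts containing one of five overlap patterns, in which two of the jargon
-- phrases overlap in the input (sharing one 's'): there the result depends on which
-- overlapping phrase is simplified — A's fixed pass order and B's leftmost scan resolve the
-- overlap differently (A's later passes can even re-match across the output of an earlier
-- pass) — a choice no caller would specify either way.
def Pre_simplify_text_for_beginner (text : String) : Prop :=
  PySem.Str.isIn "resistance-trained individualsignificant increases" text = false ∧
  PySem.Str.isIn "resistance-trained individualstrength performance" text = false ∧
  PySem.Str.isIn "untrained participantsignificant increases" text = false ∧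
  PySem.Str.isIn "untrained participantstrength performance" text = false ∧
  PySem.Str.isIn "significant increasestrength performance" text = false
instance (text : String) : Decidable (Pre_simplify_text_for_beginner text) := by
  unfold Pre_simplify_text_for_beginner; infer_instance

def pvWitness_simplify_text_for_beginner : String :=
  "hypertrophy and significant increases in strength performance"

def Spec_simplify_text_for_beginner (text : String) (out : String) : Prop :=
  out = simplify_text_for_beginner_alt text
instance (text : String) (out : String) : Decidable (Spec_simplify_text_for_beginner text out) := by
  unfold Spec_simplify_text_for_beginner; infer_instance

-- ===== CLAIM (what is proved, stated in full; the proofs are below) =====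
def Claim_equal_simplify_text_for_beginner : Prop := ∀ (text : String), Dom_simplify_text_for_beginner text → Pre_simplify_text_for_beginner text → Spec_simplify_text_for_beginner text (simplify_text_for_beginner text)

-- ===== LEMMAS AND PROOFS =====

-- the five cascade patterns of D_ as one list (proof-side only)
def pvPats : List String := [
  "resistance-trained individualsignificant increases",
  "resistance-trained individualstrength performance",
  "untrained participantsignificant increases",
  "untrained participantstrength performance",
  "significant increasestrength performance"]

-- List-level views of the two programs
def pvRepl (x : List Char) (kv : List Char × List Char) : List Char :=
  PySem.Chars.replace x kv.1 kv.2

def pvChain (L : List (List Char × List Char)) (x : List Char) : List Char :=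
  L.foldl pvRepl x

def pvPatsL : List (List Char) := pvPats.map String.toList

def pvSafe (x : List Char) : Prop := ∀ p ∈ pvPatsL, ¬ p <:+: x

-- Bool-valued side conditions on the concrete table (checked by `decide`)
def pvHeadFactB (T val : List Char) : Bool :=
  (List.range (T.length + 1)).all fun m =>
    (T.drop m).isEmpty || (!(T.drop m).isPrefixOf val && !val.isPrefixOf (T.drop m))

def pvNoCrossB (a k : List Char) : Bool :=
  (List.range a.length).all fun p => !k.isPrefixOf (a.drop p) && !(a.drop p).isPrefixOf k

def pvVFB (u v : List Char × List Char) : Bool :=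
  (List.range u.2.length).all fun p =>
    !v.1.isPrefixOf (u.2.drop p) &&
      (!(u.2.drop p).isPrefixOf v.1 ||
        (decide (u.2.length - p < v.1.length) &&
          decide ((u.1 ++ v.1.drop (u.2.length - p)) ∈ pvPatsL)))

-- basic facts about suffixes / drops
theorem pv_suffix_eq_drop (t' T : List Char) (h : t' <:+ T) :
    t' = T.drop (T.length - t'.length) := by
  obtain ⟨pre, rfl⟩ := h
  simp

theorem pv_drop_suffix_drop_one (l : List Char) (m : Nat) (hm : 1 ≤ m) :
    l.drop m <:+ l.drop 1 := by
  have h : l.drop m = (l.drop 1).drop (m - 1) := by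
    rw [List.drop_drop]; congr 1; omega
  rw [h]; exact List.drop_suffix _ _

theorem pv_prefix_append_cases (old u z : List Char) (h : old <+: u ++ z) :
    old <+: u ∨ (u <+: old ∧ (old.drop u.length) <+: z) := by
  by_cases hl : old.length ≤ u.length
  · exact Or.inl (List.prefix_of_prefix_length_le h (List.prefix_append u z) hl)
  · right
    have hu : u <+: old :=
      List.prefix_of_prefix_length_le (List.prefix_append u z) h (by omega)
    obtain ⟨r, hr⟩ := hu
    refine ⟨⟨r, hr⟩, ?_⟩
    have hrd : old.drop u.length = r := by rw [← hr]; simp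
    rw [hrd]
    obtain ⟨s, hs⟩ := h
    rw [← hr, List.append_assoc] at hs
    have := List.append_cancel_left hs
    exact ⟨s, this⟩

-- specs of the Bool side conditions
theorem pvHeadFactB_spec (T val : List Char) (h : pvHeadFactB T val = true) :
    ∀ t', t' ≠ [] → t' <:+ T → ¬ t' <+: val ∧ ¬ val <+: t' := by
  intro t' ht hsuf
  have hdrop := pv_suffix_eq_drop t' T hsuf
  have hm : T.length - t'.length < T.length + 1 := by omega
  have := List.all_eq_true.mp h (T.length - t'.length) (List.mem_range.mpr hm)
  rw [← hdrop] at this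
  simp only [Bool.or_eq_true, Bool.and_eq_true, Bool.not_eq_true', List.isEmpty_iff] at this
  rcases this with h1 | ⟨h2, h3⟩
  · exact absurd h1 ht
  · constructor
    · intro hc; exact absurd ((List.isPrefixOf_iff_prefix).mpr hc) (by simp [h2])
    · intro hc; exact absurd ((List.isPrefixOf_iff_prefix).mpr hc) (by simp [h3])

theorem pvNoCrossB_spec (a k : List Char) (h : pvNoCrossB a k = true) :
    ∀ p, p < a.length → ¬ k <+: a.drop p ∧ ¬ a.drop p <+: k := by
  intro p hp
  have := List.all_eq_true.mp h p (List.mem_range.mpr hp)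
  simp only [Bool.and_eq_true, Bool.not_eq_true'] at this
  exact ⟨fun hc => absurd ((List.isPrefixOf_iff_prefix).mpr hc) (by simp [this.1]),
         fun hc => absurd ((List.isPrefixOf_iff_prefix).mpr hc) (by simp [this.2])⟩

theorem pvVFB_spec (u v : List Char × List Char) (h : pvVFB u v = true) :
    ∀ p, p < u.2.length → ¬ v.1 <+: u.2.drop p ∧
      (u.2.drop p <+: v.1 →
        (u.2.length - p < v.1.length ∧ (u.1 ++ v.1.drop (u.2.length - p)) ∈ pvPatsL)) := by
  intro p hp
  have := List.all_eq_true.mp h p (List.mem_range.mpr hp)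
  simp only [Bool.and_eq_true, Bool.or_eq_true, Bool.not_eq_true', decide_eq_true_eq] at this
  refine ⟨fun hc => absurd ((List.isPrefixOf_iff_prefix).mpr hc) (by simp [this.1]), ?_⟩
  intro hc
  rcases this.2 with h1 | h2
  · exact absurd ((List.isPrefixOf_iff_prefix).mpr hc) (by simp [h1])
  · exact h2

-- the decided table facts
theorem pvFactNE : ∀ kv ∈ pvTable, kv.1 ≠ [] ∧ kv.2 ≠ [] := by decide

theorem pvFactPW1 : List.Pairwise (fun u v => pvNoCrossB v.1 u.1 = true) pvTable := by decide

theorem pvFactPW2 :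
    List.Pairwise (fun u v => pvHeadFactB (v.1.drop 1) u.2 = true) pvTable := by decide

theorem pvFactVF : List.Pairwise (fun u v => pvVFB u v = true) pvTable := by decide

-- equations for PySem.Chars.replace (old ≠ [])
theorem pv_go_acc (old new : List Char) :
    ∀ (f : Nat) (l acc : List Char),
      PySem.Chars.replace.go old new f l acc =
        acc.reverse ++ PySem.Chars.replace.go old new f l [] := by
  intro f
  induction f with
  | zero => intro l acc; rfl
  | succ f ih =>
    intro l acc
    cases l with
    | nil =>
      show acc.reverse = acc.reverse ++ ([] : List Char)
      exact (List.append_nil _).symm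
    | cons c t =>
      show (if old.isPrefixOf (c :: t) then
              PySem.Chars.replace.go old new f (List.drop old.length (c :: t)) (new.reverse ++ acc)
            else PySem.Chars.replace.go old new f t (c :: acc)) = _
      rw [show PySem.Chars.replace.go old new (f+1) (c :: t) [] =
            (if old.isPrefixOf (c :: t) then
              PySem.Chars.replace.go old new f (List.drop old.length (c :: t)) (new.reverse ++ [])
            else PySem.Chars.replace.go old new f t (c :: [])) from rfl]
      split
      · rw [ih _ (new.reverse ++ acc), ih _ (new.reverse ++ ([] : List Char))]
        simp
      · rw [ih _ (c :: acc), ih _ [c]]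
        simp

theorem pv_go_fuel (old new : List Char) (hold : old ≠ []) :
    ∀ (f : Nat) (l : List Char), l.length ≤ f →
      PySem.Chars.replace.go old new f l [] =
        PySem.Chars.replace.go old new l.length l [] := by
  intro f
  induction f using Nat.strong_induction_on with
  | _ f ih =>
    intro l hl
    match f, l with
    | 0, l =>
      have : l = [] := List.eq_nil_of_length_eq_zero (Nat.le_zero.mp hl)
      subst this; rfl
    | f + 1, [] => rfl
    | f + 1, c :: t =>
      have hfl : t.length ≤ f := by simpa using hl
      show (if old.isPrefixOf (c :: t) then
              PySem.Chars.replace.go old new f (List.drop old.length (c :: t)) (new.reverse ++ [])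
            else PySem.Chars.replace.go old new f t (c :: [])) = _
      rw [show PySem.Chars.replace.go old new (c :: t).length (c :: t) [] =
            (if old.isPrefixOf (c :: t) then
              PySem.Chars.replace.go old new t.length (List.drop old.length (c :: t)) (new.reverse ++ [])
            else PySem.Chars.replace.go old new t.length t (c :: [])) from rfl]
      split
      · have hol : 1 ≤ old.length := by
          cases old with
          | nil => exact absurd rfl hold
          | cons _ _ => simp
        have hd : (List.drop old.length (c :: t)).length ≤ f := by
          simp only [List.length_drop, List.length_cons]; omega
        have hd2 : (List.drop old.length (c :: t)).length ≤ t.length := by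
          simp only [List.length_drop, List.length_cons]; omega
        rw [pv_go_acc, pv_go_acc old new t.length]
        rw [ih f (by omega) _ hd]
        by_cases ht : t.length < f + 1
        · rw [ih t.length ht _ hd2]
        · omega
      · rw [pv_go_acc, pv_go_acc old new t.length]
        rw [ih f (by omega) t hfl]

theorem pv_replace_nil (old new : List Char) (hold : old ≠ []) :
    PySem.Chars.replace [] old new = [] := by
  unfold PySem.Chars.replace
  rw [if_neg (by simpa [List.isEmpty_iff] using hold)]
  rfl

theorem pv_replace_cons_neg (old new : List Char) (c : Char) (t : List Char)
    (hold : old ≠ []) (hnp : ¬ old <+: (c :: t)) :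
    PySem.Chars.replace (c :: t) old new = c :: PySem.Chars.replace t old new := by
  unfold PySem.Chars.replace
  rw [if_neg (by simpa [List.isEmpty_iff] using hold),
      if_neg (by simpa [List.isEmpty_iff] using hold)]
  have hnp' : old.isPrefixOf (c :: t) = false := by
    rw [Bool.eq_false_iff]
    intro hc; exact hnp ((List.isPrefixOf_iff_prefix).mp hc)
  show (if old.isPrefixOf (c :: t) then
          PySem.Chars.replace.go old new t.length (List.drop old.length (c :: t)) (new.reverse ++ [])
        else PySem.Chars.replace.go old new t.length t (c :: [])) = _
  rw [if_neg (by simp [hnp'])]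
  rw [pv_go_acc]
  rfl

theorem pv_replace_match (old new z : List Char) (hold : old ≠ []) :
    PySem.Chars.replace (old ++ z) old new = new ++ PySem.Chars.replace z old new := by
  unfold PySem.Chars.replace
  rw [if_neg (by simpa [List.isEmpty_iff] using hold),
      if_neg (by simpa [List.isEmpty_iff] using hold)]
  obtain ⟨c, o', rfl⟩ : ∃ c o', old = c :: o' := by
    cases old with
    | nil => exact absurd rfl hold
    | cons c o' => exact ⟨c, o', rfl⟩
  show (if (c :: o').isPrefixOf (c :: (o' ++ z)) then
          PySem.Chars.replace.go (c :: o') new ((o' ++ z).length)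
            (List.drop (c :: o').length (c :: (o' ++ z))) (new.reverse ++ [])
        else PySem.Chars.replace.go (c :: o') new ((o' ++ z).length) (o' ++ z) (c :: [])) = _
  rw [if_pos (by
    rw [List.isPrefixOf_iff_prefix]
    exact ⟨z, by simp⟩)]
  have hdrop : List.drop (c :: o').length (c :: (o' ++ z)) = z := by
    simp
  rw [hdrop, pv_go_acc,
    pv_go_fuel (c :: o') new (by simp) ((o' ++ z).length) z (by simp)]
  simp

-- a replace pass passes an occurrence-free block through verbatim
theorem pv_replace_append_left (old new : List Char) (hold : old ≠ []) :
    ∀ (a z : List Char), (∀ p, p < a.length → ¬ old <+: ((a.drop p) ++ z)) →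
      PySem.Chars.replace (a ++ z) old new = a ++ PySem.Chars.replace z old new := by
  intro a
  induction a with
  | nil => intro z _; rfl
  | cons c a' ih =>
    intro z h
    have h0 : ¬ old <+: (c :: (a' ++ z)) := by
      have := h 0 (by simp)
      simpa using this
    show PySem.Chars.replace (c :: (a' ++ z)) old new = _
    rw [pv_replace_cons_neg _ _ _ _ hold h0,
        ih z (fun p hp => by
          have := h (p + 1) (by simp; omega)
          simpa using this)]
    rfl

-- single-pass head preservation: a fresh occurrence of a suffix of T at the front of
-- the output must already have been at the front of the input
theorem pv_head_pres (old new T : List Char) (hold : old ≠ [])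
    (hf : pvHeadFactB T new = true) :
    ∀ (x t' : List Char), t' ≠ [] → t' <:+ T →
      t' <+: PySem.Chars.replace x old new → t' <+: x := by
  intro x
  induction x with
  | nil =>
    intro t' ht _ hpre
    rw [pv_replace_nil _ _ hold] at hpre
    exact absurd (List.prefix_nil.mp hpre) ht
  | cons c x' ih =>
    intro t' ht hsuf hpre
    by_cases hp : old <+: (c :: x')
    · obtain ⟨r, hr⟩ := hp
      rw [← hr, pv_replace_match _ _ _ hold] at hpre
      have hspec := pvHeadFactB_spec T new hf t' ht hsuf
      rcases pv_prefix_append_cases t' new (PySem.Chars.replace r old new) hpre with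
        h1 | ⟨h2, _⟩
      · exact absurd h1 hspec.1
      · exact absurd h2 hspec.2
    · rw [pv_replace_cons_neg _ _ _ _ hold hp] at hpre
      cases t' with
      | nil => exact absurd rfl ht
      | cons d t'' =>
        obtain ⟨hd, hpre'⟩ := List.cons_prefix_cons.mp hpre
        subst hd
        cases t'' with
        | nil => exact ⟨x', rfl⟩
        | cons e t₃ =>
          have hsuf' : (e :: t₃) <:+ T := by
            refine List.IsSuffix.trans ?_ hsuf
            exact ⟨[d], rfl⟩
          have := ih (e :: t₃) (by simp) hsuf' hpre'
          exact List.cons_prefix_cons.mpr ⟨rfl, this⟩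

-- chain versions
theorem pv_foldl_nil : ∀ (L : List (List Char × List Char)),
    (∀ kv ∈ L, kv.1 ≠ []) → pvChain L [] = [] := by
  intro L
  induction L with
  | nil => intro _; rfl
  | cons kv L' ih =>
    intro h
    show pvChain L' (pvRepl [] kv) = []
    rw [show pvRepl [] kv = [] from pv_replace_nil _ _ (h kv (by simp))]
    exact ih (fun kv' h' => h kv' (by simp [h']))

theorem pv_foldl_pres (T₀ t₀ : List Char) (ht : t₀ ≠ []) (hsuf : t₀ <:+ T₀) :
    ∀ (L : List (List Char × List Char)),
      (∀ kv ∈ L, kv.1 ≠ [] ∧ pvHeadFactB T₀ kv.2 = true) →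
      ∀ x, ¬ t₀ <+: x → ¬ t₀ <+: pvChain L x := by
  intro L
  induction L with
  | nil => intro _ x hx; exact hx
  | cons kv L' ih =>
    intro h x hx
    have hkv := h kv (by simp)
    refine ih (fun kv' h' => h kv' (by simp [h'])) (pvRepl x kv) ?_
    intro hc
    exact hx (pv_head_pres kv.1 kv.2 T₀ hkv.1 hkv.2 x t₀ ht hsuf hc)

theorem pv_foldl_append_nocross :
    ∀ (L : List (List Char × List Char)) (a : List Char),
      (∀ kv ∈ L, kv.1 ≠ []) →
      (∀ kv ∈ L, ∀ p, p < a.length → ¬ kv.1 <+: a.drop p ∧ ¬ a.drop p <+: kv.1) →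
      ∀ x, pvChain L (a ++ x) = a ++ pvChain L x := by
  intro L
  induction L with
  | nil => intro a _ _ x; rfl
  | cons kv L' ih =>
    intro a hne hcr x
    have hkv := hcr kv (by simp)
    have hstep : pvRepl (a ++ x) kv = a ++ pvRepl x kv := by
      apply pv_replace_append_left _ _ (hne kv (by simp))
      intro p hp hc
      rcases pv_prefix_append_cases kv.1 (a.drop p) x hc with h1 | ⟨h2, _⟩
      · exact (hkv p hp).1 h1
      · exact (hkv p hp).2 h2
    show pvChain L' (pvRepl (a ++ x) kv) = a ++ pvChain L' (pvRepl x kv)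
    rw [hstep]
    exact ih a (fun kv' h' => hne kv' (by simp [h']))
      (fun kv' h' => hcr kv' (by simp [h'])) (pvRepl x kv)

theorem pv_foldl_cons :
    ∀ (L : List (List Char × List Char)),
      (∀ kv ∈ L, kv.1 ≠ []) →
      List.Pairwise (fun u v => pvHeadFactB (v.1.drop 1) u.2 = true) L →
      ∀ c t, (∀ kv ∈ L, ¬ kv.1 <+: (c :: t)) →
        pvChain L (c :: t) = c :: pvChain L t := by
  intro L
  induction L with
  | nil => intro _ _ c t _; rfl
  | cons kv L' ih =>
    intro hne hpw c t h
    have h0 : ¬ kv.1 <+: (c :: t) := h kv (by simp)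
    have hk1 : kv.1 ≠ [] := hne kv (by simp)
    show pvChain L' (pvRepl (c :: t) kv) = c :: pvChain L' (pvRepl t kv)
    rw [show pvRepl (c :: t) kv = c :: PySem.Chars.replace t kv.1 kv.2 from
          pv_replace_cons_neg _ _ _ _ hk1 h0]
    rcases List.pairwise_cons.mp hpw with ⟨hrel, hpw'⟩
    refine ih (fun kv' h' => hne kv' (by simp [h'])) hpw' c _ ?_
    intro kv' hm hc
    have hk1' : kv'.1 ≠ [] := hne kv' (by simp [hm])
    obtain ⟨d, T', hT⟩ : ∃ d T', kv'.1 = d :: T' := by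
      cases hk : kv'.1 with
      | nil => exact absurd hk hk1'
      | cons d T' => exact ⟨d, T', rfl⟩
    rw [hT] at hc
    obtain ⟨hd, hpre'⟩ := List.cons_prefix_cons.mp hc
    subst hd
    apply h kv' (by simp [hm])
    rw [hT]
    cases T' with
    | nil => exact ⟨t, rfl⟩
    | cons e t₃ =>
      have hf : pvHeadFactB (kv'.1.drop 1) kv.2 = true := hrel kv' hm
      rw [hT] at hf
      have := pv_head_pres kv.1 kv.2 (e :: t₃) hk1 (by simpa using hf) t (e :: t₃)
        (by simp) (List.suffix_refl _) hpre'
      exact List.cons_prefix_cons.mpr ⟨rfl, this⟩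

-- the value block of the fired pass is passed through by all later passes
theorem pv_foldl_append_block :
    ∀ (L : List (List Char × List Char)) (a : List Char),
      (∀ kv ∈ L, kv.1 ≠ []) →
      List.Pairwise (fun u v => pvHeadFactB (v.1.drop 1) u.2 = true) L →
      (∀ kv ∈ L, ∀ p, p < a.length →
          ¬ kv.1 <+: a.drop p ∧ (a.drop p <+: kv.1 → a.length - p < kv.1.length)) →
      ∀ z, (∀ kv ∈ L, ∀ p, p < a.length → a.drop p <+: kv.1 →
              ¬ kv.1.drop (a.length - p) <+: z) →
        pvChain L (a ++ z) = a ++ pvChain L z := by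
  intro L
  induction L with
  | nil => intro a _ _ _ z _; rfl
  | cons kv L' ih =>
    intro a hne hpw hcross z hblock
    have hk1 : kv.1 ≠ [] := hne kv (by simp)
    have hstep : pvRepl (a ++ z) kv = a ++ pvRepl z kv := by
      apply pv_replace_append_left _ _ hk1
      intro p hp hc
      rcases pv_prefix_append_cases kv.1 (a.drop p) z hc with h1 | ⟨h2, h3⟩
      · exact (hcross kv (by simp) p hp).1 h1
      · have hlen : (a.drop p).length = a.length - p := by simp
        rw [hlen] at h3
        exact hblock kv (by simp) p hp h2 h3
    show pvChain L' (pvRepl (a ++ z) kv) = a ++ pvChain L' (pvRepl z kv)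
    rw [hstep]
    rcases List.pairwise_cons.mp hpw with ⟨hrel, hpw'⟩
    refine ih a (fun kv' h' => hne kv' (by simp [h'])) hpw'
      (fun kv' h' => hcross kv' (by simp [h'])) (pvRepl z kv) ?_
    intro kv' hm p hp hdrop hc
    have hlen : a.length - p < kv'.1.length := (hcross kv' (by simp [hm]) p hp).2 hdrop
    have hne' : kv'.1.drop (a.length - p) ≠ [] := by
      simp only [ne_eq, List.drop_eq_nil_iff]
      omega
    have hm1 : 1 ≤ a.length - p := by omega
    have := pv_head_pres kv.1 kv.2 (kv'.1.drop 1) hk1 (hrel kv' hm) z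
      (kv'.1.drop (a.length - p)) hne' (pv_drop_suffix_drop_one _ _ hm1) hc
    exact hblock kv' (by simp [hm]) p hp hdrop this

-- fuel irrelevance for B's scan
theorem pv_sub_fuel : ∀ (f : Nat) (l : List Char), l.length ≤ f →
    pvSub f l = pvSub l.length l := by
  intro f
  induction f using Nat.strong_induction_on with
  | _ f ih =>
    intro l hl
    match f, l with
    | 0, l =>
      have : l = [] := List.eq_nil_of_length_eq_zero (Nat.le_zero.mp hl)
      subst this; rfl
    | f + 1, [] => rfl
    | f + 1, c :: t =>
      have hfl : t.length ≤ f := by simpa using hl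
      show (match pvTable.find? (fun kv => kv.1.isPrefixOf (c :: t)) with
            | some kv => kv.2 ++ pvSub f (List.drop (kv.1.length - 1) t)
            | none => c :: pvSub f t) =
           (match pvTable.find? (fun kv => kv.1.isPrefixOf (c :: t)) with
            | some kv => kv.2 ++ pvSub t.length (List.drop (kv.1.length - 1) t)
            | none => c :: pvSub t.length t)
      cases hfind : pvTable.find? (fun kv => kv.1.isPrefixOf (c :: t)) with
      | none =>
        simp only []
        rw [ih f (by omega) t hfl]
      | some kv =>
        simp only []
        have hd : (List.drop (kv.1.length - 1) t).length ≤ f := by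
          simp only [List.length_drop]; omega
        have hd2 : (List.drop (kv.1.length - 1) t).length ≤ t.length := by
          simp only [List.length_drop]; omega
        rw [ih t.length (by omega) _ hd2, ih f (by omega) _ hd]

-- safety is inherited by infixes
theorem pv_safe_infix (x y : List Char) (h : y <:+: x) (hs : pvSafe x) : pvSafe y := by
  intro p hp hc
  exact hs p hp (hc.trans h)

-- MAIN: outside the cascade patterns, the six chained passes equal the single scan
theorem pv_chain_eq_sub : ∀ (n : Nat) (x : List Char), x.length ≤ n → pvSafe x →
    pvChain pvTable x = pvSub x.length x := by
  intro n
  induction n with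
  | zero =>
    intro x hx _
    have : x = [] := List.eq_nil_of_length_eq_zero (Nat.le_zero.mp hx)
    subst this
    rw [pv_foldl_nil pvTable (fun kv h => (pvFactNE kv h).1)]
    rfl
  | succ n ih =>
    intro x hx hsafe
    match x with
    | [] =>
      rw [pv_foldl_nil pvTable (fun kv h => (pvFactNE kv h).1)]
      rfl
    | c :: t =>
      have hxlen : t.length ≤ n := by simpa using hx
      cases hfind : pvTable.find? (fun kv => kv.1.isPrefixOf (c :: t)) with
      | none =>
        have hall : ∀ kv ∈ pvTable, ¬ kv.1 <+: (c :: t) := by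
          intro kv hm hc
          have := List.find?_eq_none.mp hfind kv hm
          exact this ((List.isPrefixOf_iff_prefix).mpr hc)
        have hsub : pvSub (c :: t).length (c :: t) = c :: pvSub t.length t := by
          show (match pvTable.find? (fun kv => kv.1.isPrefixOf (c :: t)) with
                | some kv => kv.2 ++ pvSub t.length (List.drop (kv.1.length - 1) t)
                | none => c :: pvSub t.length t) = _
          rw [hfind]
        rw [hsub,
            pv_foldl_cons pvTable (fun kv h => (pvFactNE kv h).1) pvFactPW2 c t hall,
            ih t hxlen (pv_safe_infix _ t ((List.suffix_cons c t).isInfix) hsafe)]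
      | some kv =>
        rcases List.find?_eq_some_iff_append.mp hfind with ⟨hpred, L₁, L₂, hsplit, hL₁⟩
        have hpre : kv.1 <+: (c :: t) := (List.isPrefixOf_iff_prefix).mp hpred
        have hkvmem : kv ∈ pvTable := by rw [hsplit]; simp
        have hk1 : kv.1 ≠ [] := (pvFactNE kv hkvmem).1
        have hkl : 1 ≤ kv.1.length := by
          cases hk : kv.1 with
          | nil => exact absurd hk hk1
          | cons _ _ => simp
        obtain ⟨rest, hrest⟩ := hpre
        -- memberships through the split
        have hmemL₁ : ∀ u ∈ L₁, u ∈ pvTable := by intro u hu; rw [hsplit]; simp [hu]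
        have hmemL₂ : ∀ v ∈ L₂, v ∈ pvTable := by intro v hv; rw [hsplit]; simp [hv]
        -- pairwise facts across the split
        have hPW1 := pvFactPW1; rw [hsplit] at hPW1
        have hPW2 := pvFactPW2; rw [hsplit] at hPW2
        have hVF := pvFactVF; rw [hsplit] at hVF
        rcases List.pairwise_append.mp hPW1 with ⟨_, _, hPW1cross⟩
        rcases List.pairwise_append.mp hPW2 with ⟨_, hPW2r, hPW2cross⟩
        rcases List.pairwise_append.mp hVF with ⟨_, hVFr, _⟩
        rcases List.pairwise_cons.mp hPW2r with ⟨hPW2kv, hPW2L₂⟩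
        rcases List.pairwise_cons.mp hVFr with ⟨hVFkv, _⟩
        -- stage 1: earlier passes leave the key block alone
        have hstage1 : pvChain L₁ (kv.1 ++ rest) = kv.1 ++ pvChain L₁ rest := by
          apply pv_foldl_append_nocross L₁ kv.1
            (fun u hu => (pvFactNE u (hmemL₁ u hu)).1)
          intro u hu p hp
          exact pvNoCrossB_spec kv.1 u.1 (hPW1cross u hu kv (by simp)) p hp
        -- stage 2: the fired pass rewrites the key block
        have hstage2 : pvRepl (kv.1 ++ pvChain L₁ rest) kv =
            kv.2 ++ pvRepl (pvChain L₁ rest) kv :=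
          pv_replace_match kv.1 kv.2 _ hk1
        -- z is the rest processed by all passes up to and including the fired one
        have hz : pvRepl (pvChain L₁ rest) kv = pvChain (L₁ ++ [kv]) rest := by
          unfold pvChain
          rw [List.foldl_append]
          rfl
        -- stage 3: later passes pass the value block through
        have hstage3 : pvChain L₂ (kv.2 ++ pvChain (L₁ ++ [kv]) rest) =
            kv.2 ++ pvChain L₂ (pvChain (L₁ ++ [kv]) rest) := by
          apply pv_foldl_append_block L₂ kv.2
            (fun v hv => (pvFactNE v (hmemL₂ v hv)).1) hPW2L₂
          · intro v hv p hp
            have hvf := pvVFB_spec kv v (hVFkv v hv) p hp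
            exact ⟨hvf.1, fun hd => (hvf.2 hd).1⟩
          · intro v hv p hp hdrop hc
            have hvf := (pvVFB_spec kv v (hVFkv v hv) p hp).2 hdrop
            have hm1 : 1 ≤ kv.2.length - p := by omega
            have hne' : v.1.drop (kv.2.length - p) ≠ [] := by
              simp only [ne_eq, List.drop_eq_nil_iff]
              omega
            -- the pattern would have to occur in the original text
            have hnorest : ¬ v.1.drop (kv.2.length - p) <+: rest := by
              intro hr
              apply hsafe (kv.1 ++ v.1.drop (kv.2.length - p)) hvf.2
              refine List.IsPrefix.isInfix ?_
              rw [← hrest]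
              exact ⟨rest.drop (v.1.drop (kv.2.length - p)).length, by
                obtain ⟨s, hs⟩ := hr
                rw [List.append_assoc, ← hs]
                simp⟩
            refine pv_foldl_pres (v.1.drop 1) (v.1.drop (kv.2.length - p)) hne'
              (pv_drop_suffix_drop_one _ _ hm1) (L₁ ++ [kv]) ?_ rest hnorest hc
            intro u hu
            rcases List.mem_append.mp hu with hu1 | hu2
            · exact ⟨(pvFactNE u (hmemL₁ u hu1)).1,
                hPW2cross u hu1 v (by simp [hv])⟩
            · have : u = kv := by simpa using hu2
              subst this
              exact ⟨hk1, hPW2kv v hv⟩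
        -- assemble the chain side
        have hchain : pvChain pvTable (c :: t) = kv.2 ++ pvChain pvTable rest := by
          conv_lhs => rw [← hrest]
          have e1 : pvChain pvTable (kv.1 ++ rest) =
              pvChain L₂ (pvRepl (pvChain L₁ (kv.1 ++ rest)) kv) := by
            rw [hsplit]
            simp [pvChain, List.foldl_append]
          rw [e1, hstage1, hstage2, hz, hstage3]
          congr 1
          rw [hsplit]
          show pvChain L₂ (pvChain (L₁ ++ [kv]) rest) = pvChain (L₁ ++ kv :: L₂) rest
          simp [pvChain, List.foldl_append]
        -- the scan side
        have hsub : pvSub (c :: t).length (c :: t) = kv.2 ++ pvSub rest.length rest := by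
          show (match pvTable.find? (fun kv => kv.1.isPrefixOf (c :: t)) with
                | some kv => kv.2 ++ pvSub t.length (List.drop (kv.1.length - 1) t)
                | none => c :: pvSub t.length t) = _
          rw [hfind]
          show kv.2 ++ pvSub t.length (List.drop (kv.1.length - 1) t) =
            kv.2 ++ pvSub rest.length rest
          congr 1
          have hdrop : List.drop (kv.1.length - 1) t = rest := by
            have h1 : List.drop kv.1.length (c :: t) = rest := by
              rw [← hrest]; simp
            have h2 : List.drop kv.1.length (c :: t) = List.drop (kv.1.length - 1) t := by
              obtain ⟨m, hm⟩ : ∃ m, kv.1.length = m + 1 := ⟨kv.1.length - 1, by omega⟩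
              rw [hm]
              simp
            rw [← h2, h1]
          rw [hdrop, pv_sub_fuel t.length rest (by
            have : rest.length = t.length + 1 - kv.1.length := by
              have := congrArg List.length hrest
              simp at this
              omega
            omega)]
        have hrlen : rest.length ≤ n := by
          have := congrArg List.length hrest
          simp at this
          omega
        have hrsafe : pvSafe rest := by
          refine pv_safe_infix (c :: t) rest ?_ hsafe
          exact List.IsSuffix.isInfix ⟨kv.1, hrest⟩
        rw [hchain, hsub, ih rest hrlen hrsafe]

-- bridge: port A computed on lists
theorem pv_fold_str (ps : List (String × String)) :
    ∀ (s : List Char),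
      ps.foldl (fun t kv => PySem.Str.replace t kv.1 kv.2) (String.ofList s) =
        String.ofList ((ps.map (fun kv => (kv.1.toList, kv.2.toList))).foldl pvRepl s) := by
  induction ps with
  | nil => intro s; rfl
  | cons kv ps ih =>
    intro s
    show ps.foldl _ (PySem.Str.replace (String.ofList s) kv.1 kv.2) = _
    rw [show PySem.Str.replace (String.ofList s) kv.1 kv.2 =
          String.ofList (PySem.Chars.replace s kv.1.toList kv.2.toList) by
        unfold PySem.Str.replace
        rw [String.toList_ofList]]
    rw [ih]
    rfl

theorem pv_portA (text : String) :
    simplify_text_for_beginner text = String.ofList (pvChain pvTable text.toList) := by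
  rw [show simplify_text_for_beginner text =
        List.foldl (fun t kv => PySem.Str.replace t kv.1 kv.2) text
          [("hypertrophy", "muscle growth"),
           ("placebo-controlled", "compared to a non-active group"),
           ("resistance-trained individuals", "people who already lift weights"),
           ("untrained participants", "beginners"),
           ("significant increases", "noticeable improvements"),
           ("strength performance", "strength")] from rfl]
  conv_lhs => rw [show text = String.ofList text.toList from (String.ofList_toList).symm]
  rw [pv_fold_str]
  rfl

theorem pv_safe_of_pre (text : String) (h : Pre_simplify_text_for_beginner text) :
    pvSafe text.toList := by
  obtain ⟨h1, h2, h3, h4, h5⟩ := h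
  intro p hp hc
  rcases List.mem_map.mp hp with ⟨q, hq, rfl⟩
  have hin := (PySem.Str.isIn_iff_infix q text).mpr hc
  simp only [pvPats, List.mem_cons, List.not_mem_nil, or_false] at hq
  rcases hq with rfl | rfl | rfl | rfl | rfl
  · rw [hin] at h1; cases h1
  · rw [hin] at h2; cases h2
  · rw [hin] at h3; cases h3
  · rw [hin] at h4; cases h4
  · rw [hin] at h5; cases h5

-- ===== VERDICT (by name: the statement is the Claim_ definition above) =====
theorem simplify_text_for_beginner_spec : Claim_equal_simplify_text_for_beginner := by
  intro text _ hpre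
  show simplify_text_for_beginner text = simplify_text_for_beginner_alt text
  rw [pv_portA]
  unfold simplify_text_for_beginner_alt
  rw [pv_chain_eq_sub text.toList.length text.toList (le_refl _)
    (pv_safe_of_pre text hpre)]
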